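-- pv_equiv track=rewrite | github.com/EliFrun/my-leetcode-submissions | submissions/4136-concatenate-non-zero-digits-and-multiply-by-sum-ii/solution.py | sumAndMultiply
-- ===== SOURCE A (Python) =====
-- from typing import List
--
-- def sumAndMultiply(s: str, queries: List[List[int]]) -> List[int]:
--     M = 1_000_000_007
--     prefix = [0]
--     for c in s:
--         prefix.append(prefix[-1] + int(c))
--     if prefix[-1] == 0:
--         return [0] * len(queries)
--
--     queries.sort()
--     non_zero_count = 0
--     v = 0
--     counts = [0]
--     mods = [0]
--     for c in s:
--         if c != '0':
--             non_zero_count += 1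
--             v = (10 * v + int(c)) % M
--         mods.append(v)
--         counts.append(non_zero_count)
--
--     ret = []
--     for l, r in queries:
--         cnt = prefix[r + 1] - prefix[l]
--         st = (M + mods[r + 1] - mods[l] * pow(10, counts[r + 1] - counts[l], M)) % M
--         ret.append((cnt * st) % M)
--     return ret
-- ===== SOURCE B (Python) =====
-- from typing import List
--
-- def sumAndMultiply(s: str, queries: List[List[int]]) -> List[int]:
--     M = 1_000_000_007
--     if all(c == '0' for c in s):
--         return [0] * len(queries)
--     queries.sort()
--     ret = []
--     for l, r in queries:
--         ds = 0
--         v = 0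
--         for c in s[l:r + 1]:
--             d = int(c)
--             ds += d
--             if d:
--                 v = (10 * v + d) % M
--         ret.append((ds * v) % M)
--     return ret
-- ===== Notes on version B (the rewrite author's own statement) =====
-- stated objective: simpler
-- what changed: Drops the prefix/mods/counts precomputation tables and the modular power/inverse formula entirely; each query is answered by a direct scan of s[l:r+1] that accumulates the digit sum and rebuilds the concatenated non-zero number with v=(10*v+d)%M.
-- outside the precondition, e.g. on sumAndMultiply('12', [[2, 0]]): A returns [800000006], B returns [0]
import Mathlib
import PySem

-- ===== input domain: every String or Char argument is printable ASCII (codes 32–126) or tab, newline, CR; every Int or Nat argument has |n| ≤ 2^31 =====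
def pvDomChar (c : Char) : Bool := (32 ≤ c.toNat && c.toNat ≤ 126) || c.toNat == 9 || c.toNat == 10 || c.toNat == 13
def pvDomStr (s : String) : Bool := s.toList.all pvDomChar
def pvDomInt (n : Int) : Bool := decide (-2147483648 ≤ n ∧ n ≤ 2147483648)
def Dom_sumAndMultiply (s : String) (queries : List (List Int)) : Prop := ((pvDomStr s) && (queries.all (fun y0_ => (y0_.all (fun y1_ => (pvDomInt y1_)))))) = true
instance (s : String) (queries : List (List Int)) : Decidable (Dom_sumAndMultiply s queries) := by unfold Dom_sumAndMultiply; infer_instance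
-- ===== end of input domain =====

-- B drops A's pref/mods/counts tables and modular-power formula and answers each query by a direct
-- scan of the window s[l:r+1] (objective: simpler).  Both A and B sort `queries` in place (identically,
-- and only when the digit sum is non-zero); the theorems below are about the return value.

-- int(c) for one character of s; exact on digit characters (Pre_ restricts s to digits)
def pvDigit (c : Char) : Int := (c.toNat : Int) - 48

-- ===== PORT A =====
def sumAndMultiply (s : String) (queries : List (List Int)) : List Int :=
  let M : Int := 1000000007
  let pref := s.toList.foldl
    (fun pre c => pre ++ [PySem.List.pyGetD pre (-1) 0 + pvDigit c]) [(0 : Int)]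
  if PySem.List.pyGetD pref (-1) 0 = 0 then
    List.replicate queries.length 0
  else
    let qs := PySem.List.sorted queries (fun q => q) false
    -- one fold carrying (non_zero_count, v, counts, mods)
    let t := s.toList.foldl
      (fun (t : Int × Int × List Int × List Int) c =>
        let nzc := if c ≠ '0' then t.1 + 1 else t.1
        let v := if c ≠ '0' then PySem.Int.mod (10 * t.2.1 + pvDigit c) M else t.2.1
        (nzc, v, t.2.2.1 ++ [nzc], t.2.2.2 ++ [v]))
      (0, 0, [(0 : Int)], [(0 : Int)])
    qs.foldl (fun ret q =>
      match q with
      | [l, r] =>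
        let cnt := PySem.List.pyGetD pref (r + 1) 0 - PySem.List.pyGetD pref l 0
        let st := PySem.Int.mod
          (M + PySem.List.pyGetD t.2.2.2 (r + 1) 0 -
            PySem.List.pyGetD t.2.2.2 l 0 *
              PySem.Int.powMod 10
                (PySem.List.pyGetD t.2.2.1 (r + 1) 0 - PySem.List.pyGetD t.2.2.1 l 0).toNat M) M
        ret ++ [PySem.Int.mod (cnt * st) M]
      | _ => ret ++ [0]  -- 'for l, r in queries' raises on a non-pair; Pre_ excludes those
      ) []

-- ===== PORT B =====
-- int(c) for one character of the window; exact on digit characters (Pre_ restricts s to digits)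
def pvDigitB (c : Char) : Int := (c.toNat : Int) - 48

def sumAndMultiply_alt (s : String) (queries : List (List Int)) : List Int :=
  let M : Int := 1000000007
  if s.toList.all (fun c => c == '0') then
    List.replicate queries.length 0
  else
    (PySem.List.sorted queries (fun q => q) false).foldl (fun ret q =>
      match q with
      | l :: r :: rest =>
        if rest = [] then
          let p := (PySem.List.slice s.toList (some l) (some (r + 1))).foldl
            (fun (p : Int × Int) c =>
              let d := pvDigitB c
              (p.1 + d, if d ≠ 0 then PySem.Int.mod (10 * p.2 + d) M else p.2)) (0, 0)
          ret ++ [PySem.Int.mod (p.1 * p.2) M]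
        else ret ++ [0]  -- 'for l, r in queries' raises on a non-pair; Pre_ excludes those
      | [] => ret ++ [0]  -- likewise
      | [_] => ret ++ [0]  -- likewise
      ) []

-- ===== PRECONDITION & SPEC =====
-- Pre_ excludes inputs where A raises (a non-digit character in s → ValueError from int(c); a query that
-- is not a 2-element list → unpack error; an index past the end of s → IndexError) and queries with a
-- negative or reversed range, on which A's negative-index-wraparound / negative-count value is an
-- accidental corner nobody specifies, while B naturally returns 0 for the empty window.
def Pre_sumAndMultiply (s : String) (queries : List (List Int)) : Prop :=
  ((s.toList.all fun c => decide ('0' ≤ c) && decide (c ≤ '9')) &&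
   ((s.toList.all fun c => c == '0') ||
    (queries.all fun q =>
      match q with
      | [] => false
      | [_] => false
      | l :: r :: rest =>
          rest.isEmpty && decide (0 ≤ l) && decide (l ≤ r) && decide (r < (s.toList.length : Int))))) = true
instance (s : String) (queries : List (List Int)) : Decidable (Pre_sumAndMultiply s queries) := by
  unfold Pre_sumAndMultiply; infer_instance

def pvWitness_sumAndMultiply : String × List (List Int) := ("1203", [[1, 3], [0, 2]])

def Spec_sumAndMultiply (s : String) (queries : List (List Int)) (out : List Int) : Prop := out = sumAndMultiply_alt s queries
instance (s : String) (queries : List (List Int)) (out : List Int) : Decidable (Spec_sumAndMultiply s queries out) := by unfold Spec_sumAndMultiply; infer_instance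

-- ===== CLAIM (what is proved, stated in full; the proofs are below) =====
def Claim_equal_sumAndMultiply : Prop := ∀ (s : String) (queries : List (List Int)), Dom_sumAndMultiply s queries → Pre_sumAndMultiply s queries → Spec_sumAndMultiply s queries (sumAndMultiply s queries)

-- ===== LEMMAS AND PROOFS =====

-- digit sum, count of non-zero digits, and the running concatenation value over a char list
def pvS (cs : List Char) : Int := (cs.map pvDigit).sum
def pvC (cs : List Char) : Nat := cs.countP (fun c => c != '0')
def pvF (v : Int) (cs : List Char) : Int :=
  cs.foldl (fun v c => if c ≠ '0' then PySem.Int.mod (10 * v + pvDigit c) 1000000007 else v) v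

theorem pvDigit_eq_zero_iff (c : Char) : pvDigit c = 0 ↔ c = '0' := by
  unfold pvDigit
  constructor
  · intro h
    have h48 : c.toNat = 48 := by omega
    have hv : c.val.toNat = 48 := h48
    exact Char.ext (UInt32.toNat_inj.mp (by rw [hv]; rfl))
  · rintro rfl; decide

theorem pvDigit_nonneg (c : Char) (h : '0' ≤ c) : 0 ≤ pvDigit c := by
  have h1 : (48:Nat) ≤ c.val.toNat := UInt32.le_iff_toNat_le.mp (Char.le_def.mp h)
  have h2 : c.toNat = c.val.toNat := rfl
  unfold pvDigit; omega

theorem pvS_append (xs ys : List Char) : pvS (xs ++ ys) = pvS xs + pvS ys := by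
  simp [pvS]

theorem pvF_append (v : Int) (xs ys : List Char) : pvF v (xs ++ ys) = pvF (pvF v xs) ys := by
  simp [pvF, List.foldl_append]

theorem pvF_singleton (v : Int) (c : Char) :
    pvF v [c] = if c ≠ '0' then PySem.Int.mod (10 * v + pvDigit c) 1000000007 else v := by
  simp [pvF]

-- A's prefix loop builds the list of partial digit sums
theorem prefix_char (cs : List Char) (pre : List Int) (x : Int) :
    cs.foldl (fun pre c => pre ++ [PySem.List.pyGetD pre (-1) 0 + pvDigit c]) (pre ++ [x]) =
      pre ++ [x] ++ (List.range cs.length).map (fun i => x + pvS (cs.take (i + 1))) := by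
  induction cs generalizing pre x with
  | nil => simp
  | cons c cs ih =>
    simp only [List.foldl_cons, PySem.List.pyGetD_neg_one_append_singleton]
    rw [show pre ++ [x] ++ [x + pvDigit c] = (pre ++ [x]) ++ [x + pvDigit c] from by simp,
        ih (pre ++ [x]) (x + pvDigit c)]
    simp only [List.length_cons, List.range_succ_eq_map, List.map_cons, List.map_map]
    simp [pvS, List.append_assoc, add_assoc, Function.comp_def]

theorem pvC_cons (c : Char) (t : List Char) :
    (pvC (c :: t) : Int) = (if c ≠ '0' then 1 else 0) + (pvC t : Int) := by
  by_cases h : c = '0' <;> simp [pvC, h] <;> ring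

theorem pvF_cons (c : Char) (v : Int) (t : List Char) : pvF v (c :: t) =
    pvF (if c ≠ '0' then PySem.Int.mod (10 * v + pvDigit c) 1000000007 else v) t := by
  simp [pvF]

-- A's table loop builds the running non-zero count and concatenation value
theorem table_char (cs : List Char) (nzc v : Int) (counts mods : List Int) :
    cs.foldl
      (fun (t : Int × Int × List Int × List Int) c =>
        let nzc := if c ≠ '0' then t.1 + 1 else t.1
        let v := if c ≠ '0' then PySem.Int.mod (10 * t.2.1 + pvDigit c) 1000000007 else t.2.1
        (nzc, v, t.2.2.1 ++ [nzc], t.2.2.2 ++ [v]))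
      (nzc, v, counts, mods) =
    (nzc + (pvC cs : Int), pvF v cs,
     counts ++ (List.range cs.length).map (fun i => nzc + (pvC (cs.take (i + 1)) : Int)),
     mods ++ (List.range cs.length).map (fun i => pvF v (cs.take (i + 1)))) := by
  induction cs generalizing nzc v counts mods with
  | nil => simp [pvC, pvF]
  | cons c cs ih =>
    simp only [List.foldl_cons]
    rw [ih]
    simp only [List.length_cons, List.range_succ_eq_map, List.map_cons, List.map_map,
      List.take_succ_cons, List.take_zero, Function.comp_def, pvF_cons, pvC_cons]
    by_cases h : c = '0'
    · simp only [h, ite_false, ite_true, not_true, ne_eq, not_not, reduceIte]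
      refine Prod.ext ?_ (Prod.ext rfl (Prod.ext ?_ ?_))
      · simp
      · simp [pvC, List.append_assoc]
      · simp [pvF, List.append_assoc]
    · simp only [h, ite_false, ite_true, not_false_iff, ne_eq, reduceIte, if_true]
      refine Prod.ext ?_ (Prod.ext rfl (Prod.ext ?_ ?_))
      · simp; ring
      · simp [pvC, List.append_assoc]; intro a _; ring
      · simp [pvF, List.append_assoc]

-- indexing / last element of a list of the shape h 0 :: [h 1, …, h n]
theorem getIdx (h : Nat → Int) (n : Nat) (i : Int) (h0 : 0 ≤ i) (h1 : i ≤ (n : Int)) :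
    PySem.List.pyGetD (h 0 :: (List.range n).map (fun j => h (j + 1))) i 0 = h i.toNat := by
  have hil : i < ((h 0 :: (List.range n).map (fun j => h (j + 1))).length : Int) := by
    simp; push_cast; omega
  rw [PySem.List.pyGetD_eq_getElem _ _ h0 hil]
  rcases Nat.eq_zero_or_pos i.toNat with hz | hp
  · simp [hz]
  · obtain ⟨k, hk2⟩ : ∃ k, i.toNat = k + 1 := ⟨i.toNat - 1, by omega⟩
    have hk : k < n := by omega
    simp [hk2]

theorem lastIdx (h : Nat → Int) (n : Nat) :
    PySem.List.pyGetD (h 0 :: (List.range n).map (fun j => h (j + 1))) (-1) 0 = h n := by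
  rcases Nat.eq_zero_or_pos n with hz | hp
  · subst hz
    exact PySem.List.pyGetD_neg_one_append_singleton [] (h 0) 0
  · obtain ⟨m, rfl⟩ : ∃ m, n = m + 1 := ⟨n - 1, by omega⟩
    rw [List.range_succ, List.map_append]
    simp only [List.map_cons, List.map_nil]
    rw [show h 0 :: ((List.range m).map (fun j => h (j + 1)) ++ [h (m + 1)]) =
          (h 0 :: (List.range m).map (fun j => h (j + 1))) ++ [h (m + 1)] from rfl]
    exact PySem.List.pyGetD_neg_one_append_singleton _ _ 0

theorem mod_small (v : Int) (h0 : 0 ≤ v) (h1 : v < 1000000007) :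
    PySem.Int.mod v 1000000007 = v := by
  rw [PySem.Int.mod_eq_emod_of_pos (by norm_num)]
  exact Int.emod_eq_of_lt h0 h1

theorem pvF_bounds (cs : List Char) (v : Int) (hv : 0 ≤ v ∧ v < 1000000007) :
    0 ≤ pvF v cs ∧ pvF v cs < 1000000007 := by
  induction cs generalizing v with
  | nil => exact hv
  | cons c cs ih =>
    simp only [pvF, List.foldl_cons]
    by_cases h : c = '0'
    · simpa [h, pvF] using ih v hv
    · simp only [h, ne_eq, not_false_iff, if_true]
      exact ih _ ⟨PySem.Int.mod_nonneg _ (by norm_num), PySem.Int.mod_lt _ (by norm_num)⟩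

-- shifting the initial value out of pvF, mod M
theorem pvF_shift (win : List Char) (v : Int) (hv : 0 ≤ v ∧ v < 1000000007) :
    pvF v win = PySem.Int.mod (v * 10 ^ pvC win + pvF 0 win) 1000000007 := by
  induction win using List.reverseRecOn with
  | nil =>
    simp only [pvF, List.foldl_nil, pvC, List.countP_nil, pow_zero, mul_one, add_zero]
    exact (mod_small v hv.1 hv.2).symm
  | append_singleton win c ih =>
    rw [pvF_append, pvF_append, pvF_singleton, pvF_singleton]
    have hk : pvC (win ++ [c]) = pvC win + (if c ≠ '0' then 1 else 0) := by
      by_cases h : c = '0' <;> simp [pvC, h]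
    rw [hk, ih]
    have hM : (0:Int) < 1000000007 := by norm_num
    by_cases h : c = '0'
    · simp [h]
    · simp only [h, ne_eq, not_false_iff, if_true, reduceIte]
      set k := pvC win
      set w0 := pvF 0 win
      set d := pvDigit c
      simp only [PySem.Int.mod_eq_emod_of_pos hM]
      have e1 : (10 * ((v * 10 ^ k + w0) % 1000000007) + d) % 1000000007
          = (10 * (v * 10 ^ k + w0) + d) % 1000000007 := by
        conv_lhs => rw [Int.add_emod, Int.mul_emod, Int.emod_emod_of_dvd _ dvd_rfl,
          ← Int.mul_emod, ← Int.add_emod]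
      have e2 : (v * 10 ^ (k+1) + (10 * w0 + d) % 1000000007) % 1000000007
          = (v * 10 ^ (k+1) + (10 * w0 + d)) % 1000000007 := by
        conv_lhs => rw [Int.add_emod, Int.emod_emod_of_dvd _ dvd_rfl, ← Int.add_emod]
      rw [e1, e2]
      congr 1
      ring

-- B's per-window pair fold
theorem pair_fold (win : List Char) (a v : Int) :
    win.foldl
      (fun (p : Int × Int) c =>
        let d := pvDigit c
        (p.1 + d, if d ≠ 0 then PySem.Int.mod (10 * p.2 + d) 1000000007 else p.2)) (a, v) =
      (a + pvS win, pvF v win) := by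
  induction win generalizing a v with
  | nil => simp [pvS, pvF]
  | cons c win ih =>
    simp only [List.foldl_cons]
    rw [ih]
    have hcond : (if pvDigit c ≠ 0 then PySem.Int.mod (10 * v + pvDigit c) 1000000007 else v)
        = if c ≠ '0' then PySem.Int.mod (10 * v + pvDigit c) 1000000007 else v := by
      simp [pvDigit_eq_zero_iff]
    rw [hcond]
    simp [pvS, pvF, add_assoc]

theorem pvS_eq_zero_iff (cs : List Char) (h : ∀ c ∈ cs, 0 ≤ pvDigit c) :
    pvS cs = 0 ↔ ∀ c ∈ cs, pvDigit c = 0 := by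
  induction cs with
  | nil => simp [pvS]
  | cons c cs ih =>
    have hS : pvS (c :: cs) = pvDigit c + pvS cs := by simp [pvS]
    have hnn : 0 ≤ pvS cs := by
      have : ∀ x ∈ cs.map pvDigit, 0 ≤ x := by
        intro x hx; obtain ⟨c', hc', rfl⟩ := List.mem_map.mp hx
        exact h c' (List.mem_cons_of_mem _ hc')
      exact List.sum_nonneg this
    have hc := h c List.mem_cons_self
    rw [hS]
    constructor
    · intro h0
      have h1 : pvDigit c = 0 ∧ pvS cs = 0 := by omega
      intro c' hc'
      rcases List.mem_cons.mp hc' with rfl | hmem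
      · exact h1.1
      · exact ((ih (fun x hx => h x (List.mem_cons_of_mem _ hx))).mp h1.2) c' hmem
    · intro hall
      have h1 : pvDigit c = 0 := hall c List.mem_cons_self
      have h2 : pvS cs = 0 :=
        (ih (fun x hx => h x (List.mem_cons_of_mem _ hx))).mpr
          (fun c' hc' => hall c' (List.mem_cons_of_mem _ hc'))
      omega

-- the value A computes for one in-range query equals B's direct window scan
theorem query_eq (cs : List Char) (l r : Int)
    (h0 : 0 ≤ l) (hlr : l ≤ r) (hr : r < (cs.length : Int)) :
    PySem.Int.mod
      ((PySem.List.pyGetD (pvS (cs.take 0) :: (List.range cs.length).map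
            (fun j => pvS (cs.take (j + 1)))) (r + 1) 0 -
        PySem.List.pyGetD (pvS (cs.take 0) :: (List.range cs.length).map
            (fun j => pvS (cs.take (j + 1)))) l 0) *
       PySem.Int.mod
         (1000000007 +
            PySem.List.pyGetD (pvF 0 (cs.take 0) :: (List.range cs.length).map
                (fun j => pvF 0 (cs.take (j + 1)))) (r + 1) 0 -
            PySem.List.pyGetD (pvF 0 (cs.take 0) :: (List.range cs.length).map
                (fun j => pvF 0 (cs.take (j + 1)))) l 0 *
              PySem.Int.powMod 10
                (PySem.List.pyGetD ((pvC (cs.take 0) : Int) :: (List.range cs.length).map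
                    (fun j => (pvC (cs.take (j + 1)) : Int))) (r + 1) 0 -
                 PySem.List.pyGetD ((pvC (cs.take 0) : Int) :: (List.range cs.length).map
                    (fun j => (pvC (cs.take (j + 1)) : Int))) l 0).toNat 1000000007)
         1000000007)
      1000000007 =
    PySem.Int.mod
      (pvS ((cs.drop l.toNat).take ((r + 1).toNat - l.toNat)) *
       pvF 0 ((cs.drop l.toNat).take ((r + 1).toNat - l.toNat))) 1000000007 := by
  have hM : (0:Int) < 1000000007 := by norm_num
  set n := cs.length with hn
  have hl' : l.toNat ≤ n := by omega
  have hm' : (r + 1).toNat ≤ n := by omega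
  have hlm : l.toNat ≤ (r + 1).toNat := by omega
  set l' := l.toNat
  set m' := (r + 1).toNat
  set win := (cs.drop l').take (m' - l') with hwin
  have htake : cs.take m' = cs.take l' ++ win := by
    rw [hwin, ← List.take_add]
    congr 1
    omega
  -- resolve the table lookups
  have eS1 : PySem.List.pyGetD (pvS (cs.take 0) :: (List.range n).map
      (fun j => pvS (cs.take (j + 1)))) (r + 1) 0 = pvS (cs.take m') :=
    getIdx (fun k => pvS (cs.take k)) n (r + 1) (by omega) (by omega)
  have eS2 : PySem.List.pyGetD (pvS (cs.take 0) :: (List.range n).map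
      (fun j => pvS (cs.take (j + 1)))) l 0 = pvS (cs.take l') :=
    getIdx (fun k => pvS (cs.take k)) n l (by omega) (by omega)
  have eF1 : PySem.List.pyGetD (pvF 0 (cs.take 0) :: (List.range n).map
      (fun j => pvF 0 (cs.take (j + 1)))) (r + 1) 0 = pvF 0 (cs.take m') :=
    getIdx (fun k => pvF 0 (cs.take k)) n (r + 1) (by omega) (by omega)
  have eF2 : PySem.List.pyGetD (pvF 0 (cs.take 0) :: (List.range n).map
      (fun j => pvF 0 (cs.take (j + 1)))) l 0 = pvF 0 (cs.take l') :=
    getIdx (fun k => pvF 0 (cs.take k)) n l (by omega) (by omega)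
  have eC1 : PySem.List.pyGetD ((pvC (cs.take 0) : Int) :: (List.range n).map
      (fun j => (pvC (cs.take (j + 1)) : Int))) (r + 1) 0 = (pvC (cs.take m') : Int) :=
    getIdx (fun k => (pvC (cs.take k) : Int)) n (r + 1) (by omega) (by omega)
  have eC2 : PySem.List.pyGetD ((pvC (cs.take 0) : Int) :: (List.range n).map
      (fun j => (pvC (cs.take (j + 1)) : Int))) l 0 = (pvC (cs.take l') : Int) :=
    getIdx (fun k => (pvC (cs.take k) : Int)) n l (by omega) (by omega)
  rw [eS1, eS2, eF1, eF2, eC1, eC2, htake, pvS_append, pvF_append]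
  have eC : pvC (cs.take l' ++ win) = pvC (cs.take l') + pvC win := by
    simp [pvC, List.countP_append]
  rw [eC]
  have ek : ((pvC (cs.take l') + pvC win : Nat) : Int) - (pvC (cs.take l') : Int) = (pvC win : Int) := by
    push_cast; ring
  rw [ek, Int.toNat_natCast]
  -- abbreviate
  set vl := pvF 0 (cs.take l') with hvl
  set w := pvF 0 win with hw
  set k := pvC win with hk
  have hbl : 0 ≤ vl ∧ vl < 1000000007 := pvF_bounds _ 0 (by norm_num)
  have hbw : 0 ≤ w ∧ w < 1000000007 := pvF_bounds _ 0 (by norm_num)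
  rw [pvF_shift win vl hbl, ← hw, ← hk]
  -- the inner 'st' equals w
  have hst : PySem.Int.mod
      (1000000007 + PySem.Int.mod (vl * 10 ^ k + w) 1000000007 -
        vl * PySem.Int.powMod 10 k 1000000007) 1000000007 = w := by
    have hpow : PySem.Int.powMod 10 k 1000000007 = PySem.Int.mod (10 ^ k) 1000000007 := rfl
    rw [hpow]
    simp only [PySem.Int.mod_eq_emod_of_pos hM]
    have e3 : (1000000007 + (vl * 10 ^ k + w) % 1000000007 -
        vl * (10 ^ k % 1000000007)) % 1000000007 =
        (1000000007 + (vl * 10 ^ k + w) - vl * 10 ^ k) % 1000000007 := by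
      conv_lhs => rw [Int.sub_emod, Int.add_emod 1000000007,
        Int.emod_emod_of_dvd _ dvd_rfl, ← Int.add_emod, Int.mul_emod vl,
        Int.emod_emod_of_dvd _ dvd_rfl, ← Int.mul_emod, ← Int.sub_emod]
    rw [e3, show (1000000007:Int) + (vl * 10 ^ k + w) - vl * 10 ^ k = w + 1000000007 * 1 by ring,
        Int.add_mul_emod_self_left]
    exact Int.emod_eq_of_lt hbw.1 hbw.2
  rw [hst]
  congr 1
  ring

theorem main_eq (s : String) (queries : List (List Int))
    (hpre : Pre_sumAndMultiply s queries) :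
    sumAndMultiply s queries = sumAndMultiply_alt s queries := by
  unfold Pre_sumAndMultiply at hpre
  simp only [Bool.and_eq_true, Bool.or_eq_true, List.all_eq_true, decide_eq_true_eq] at hpre
  obtain ⟨hdig, hrest⟩ := hpre
  set cs := s.toList with hcs
  -- the prefix list of A
  have epref : cs.foldl (fun pre c => pre ++ [PySem.List.pyGetD pre (-1) 0 + pvDigit c]) [(0 : Int)]
      = pvS (cs.take 0) :: (List.range cs.length).map (fun j => pvS (cs.take (j + 1))) := by
    rw [show [(0 : Int)] = [] ++ [0] from rfl, prefix_char]
    simp [pvS]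
  -- the condition of A's early return is the total digit sum; B tests all-zero characters
  have elast : PySem.List.pyGetD
      (pvS (cs.take 0) :: (List.range cs.length).map (fun j => pvS (cs.take (j + 1)))) (-1) 0
      = pvS cs := by
    rw [lastIdx (fun k => pvS (cs.take k)) cs.length, List.take_length]
  have hzero : pvS cs = 0 ↔ cs.all (fun c => c == '0') = true := by
    rw [pvS_eq_zero_iff cs (fun c hc => pvDigit_nonneg c (hdig c hc).1), List.all_eq_true]
    constructor
    · intro hall c hc; exact beq_iff_eq.mpr ((pvDigit_eq_zero_iff c).mp (hall c hc))
    · intro hall c hc; exact (pvDigit_eq_zero_iff c).mpr (beq_iff_eq.mp (hall c hc))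
  -- A's counts/mods tables
  have etable : cs.foldl
      (fun (t : Int × Int × List Int × List Int) c =>
        let nzc := if c ≠ '0' then t.1 + 1 else t.1
        let v := if c ≠ '0' then PySem.Int.mod (10 * t.2.1 + pvDigit c) 1000000007 else t.2.1
        (nzc, v, t.2.2.1 ++ [nzc], t.2.2.2 ++ [v]))
      (0, 0, [(0 : Int)], [(0 : Int)]) =
      (0 + (pvC cs : Int), pvF 0 cs,
       (pvC (cs.take 0) : Int) :: (List.range cs.length).map (fun j => (pvC (cs.take (j + 1)) : Int)),
       pvF 0 (cs.take 0) :: (List.range cs.length).map (fun j => pvF 0 (cs.take (j + 1)))) := by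
    rw [table_char]
    simp [pvC, pvF]
  unfold sumAndMultiply sumAndMultiply_alt
  simp only [show pvDigitB = pvDigit from rfl]
  simp only [← hcs]
  rw [epref, elast, etable]
  by_cases h0 : pvS cs = 0
  · rw [if_pos h0, if_pos (hzero.mp h0)]
  · have hq : ∀ q ∈ queries, ∃ l r : Int,
        q = [l, r] ∧ 0 ≤ l ∧ l ≤ r ∧ r < (cs.length : Int) := by
      have hq0 := hrest.resolve_left
        (fun hb => h0 (hzero.mpr (by simpa [List.all_eq_true] using hb)))
      intro q hqm
      have hh := hq0 q hqm
      rcases q with _ | ⟨l, _ | ⟨r, _ | ⟨x, t⟩⟩⟩ <;> simp_all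
    rw [if_neg h0, if_neg (fun hb => h0 (hzero.mpr hb))]
    apply PySem.List.foldl_congr_mem
    intro ret q hqm
    obtain ⟨l, r, rfl, hl, hlr, hr⟩ := hq q ((PySem.List.mem_sorted _ _ _ _).mp hqm)
    simp only []
    rw [PySem.List.slice_toNat cs (by omega) (by omega), pair_fold, zero_add]
    congr 2
    exact query_eq cs l r hl hlr hr

-- ===== VERDICT (by name: the statement is the Claim_ definition above) =====
theorem sumAndMultiply_spec : Claim_equal_sumAndMultiply := by
  intro s queries _ hpre
  exact main_eq s queries hpre
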